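-- pv_equiv track=rewrite | github.com/zaphodsdad/GhostWriter3000 | backend/app/utils/outline_parser.py | parse_character_content
-- ===== SOURCE A (Python) =====
-- from typing import List, Dict, Any, Optional, Tuple
--
-- def parse_character_content(content: str) -> Dict[str, Any]:
--     """Parse character definition content."""
--     result = {
--         'role': None,
--         'description': None,
--         'voice': None,
--         'first_appearance': None
--     }
--
--     for line in content.strip().split('\n'):
--         stripped = line.strip()
--
--         if stripped.startswith('**Role:**'):
--             result['role'] = stripped[9:].strip()
--         elif stripped.startswith('**Description:**'):
--             result['description'] = stripped[16:].strip()
--         elif stripped.startswith('**Voice:**'):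
--             result['voice'] = stripped[10:].strip()
--         elif stripped.startswith('**First Appearance:**'):
--             result['first_appearance'] = stripped[21:].strip()
--
--     return result
-- ===== SOURCE B (Python) =====
-- # Four independent backward searches (last occurrence = first match in reversed lines)
-- # instead of one forward pass mutating a dict.
-- def _last_value(rev_lines, prefix):
--     for line in rev_lines:
--         if line.startswith(prefix):
--             return line[len(prefix):].strip()
--     return None
--
-- def parse_character_content(content: str):
--     """Parse character definition content."""
--     rev_lines = [line.strip() for line in content.strip().split('\n')][::-1]
--     return {
--         'role': _last_value(rev_lines, '**Role:**'),
--         'description': _last_value(rev_lines, '**Description:**'),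
--         'voice': _last_value(rev_lines, '**Voice:**'),
--         'first_appearance': _last_value(rev_lines, '**First Appearance:**'),
--     }
-- ===== Notes on version B (the rewrite author's own statement) =====
-- stated objective: alternative
-- what changed: A makes one forward pass mutating a dict through a four-branch elif chain; B makes four independent backward searches over the reversed stripped lines (last occurrence = first match in the reversed list) and builds the result dict in one expression, correct because the four header prefixes are mutually exclusive.
import Mathlib
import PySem

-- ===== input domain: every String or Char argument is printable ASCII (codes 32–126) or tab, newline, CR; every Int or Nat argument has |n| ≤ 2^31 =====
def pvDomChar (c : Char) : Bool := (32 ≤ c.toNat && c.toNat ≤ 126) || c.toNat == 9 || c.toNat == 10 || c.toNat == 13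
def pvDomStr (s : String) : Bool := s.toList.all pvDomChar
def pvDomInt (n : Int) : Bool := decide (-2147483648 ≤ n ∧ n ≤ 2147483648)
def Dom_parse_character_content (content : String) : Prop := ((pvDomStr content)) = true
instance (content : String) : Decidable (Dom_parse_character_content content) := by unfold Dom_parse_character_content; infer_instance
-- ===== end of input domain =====

-- B replaces A's single forward pass (dict mutated through a four-branch elif chain) by four
-- independent backward searches over the reversed stripped lines (objective: alternative;
-- correct because the four header prefixes are mutually exclusive).

-- ===== PORT A =====
def pvInitA : PySem.Dict String (Option String) :=
  PySem.Dict.ofList [("role", none), ("description", none), ("voice", none), ("first_appearance", none)]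

-- the body of A's loop, after 'stripped = line.strip()'
def pvHandleA (d : PySem.Dict String (Option String)) (stripped : String) :
    PySem.Dict String (Option String) :=
  if PySem.Str.startswith stripped "**Role:**" then
    d.insert "role" (some (PySem.Str.strip (PySem.Str.slice stripped (some 9) none)))
  else if PySem.Str.startswith stripped "**Description:**" then
    d.insert "description" (some (PySem.Str.strip (PySem.Str.slice stripped (some 16) none)))
  else if PySem.Str.startswith stripped "**Voice:**" then
    d.insert "voice" (some (PySem.Str.strip (PySem.Str.slice stripped (some 10) none)))
  else if PySem.Str.startswith stripped "**First Appearance:**" then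
    d.insert "first_appearance" (some (PySem.Str.strip (PySem.Str.slice stripped (some 21) none)))
  else d

def parse_character_content (content : String) : List (String × Option String) :=
  -- split('\n'): the separator is nonempty, so split? is always some; getD never fires
  (((PySem.Str.split? (PySem.Str.strip content) "\n").getD []).foldl
    (fun d line => pvHandleA d (PySem.Str.strip line)) pvInitA).items

-- ===== PORT B =====
-- _last_value: scan the reversed lines, return the first match (value with len(prefix) sliced off)
def pvLastValue (revLines : List String) (pre : String) (n : Int) : Option String :=
  match revLines with
  | [] => none
  | line :: rest =>
    if PySem.Str.startswith line pre then
      some (PySem.Str.strip (PySem.Str.slice line (some n) none))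
    else pvLastValue rest pre n

def parse_character_content_alt (content : String) : List (String × Option String) :=
  let revLines := (((PySem.Str.split? (PySem.Str.strip content) "\n").getD []).map
      PySem.Str.strip).reverse
  [("role", pvLastValue revLines "**Role:**" 9),
   ("description", pvLastValue revLines "**Description:**" 16),
   ("voice", pvLastValue revLines "**Voice:**" 10),
   ("first_appearance", pvLastValue revLines "**First Appearance:**" 21)]

-- ===== PRECONDITION & SPEC =====
def Spec_parse_character_content (content : String) (out : List (String × Option String)) : Prop := out = parse_character_content_alt content
instance (content : String) (out : List (String × Option String)) : Decidable (Spec_parse_character_content content out) := by unfold Spec_parse_character_content; infer_instance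

-- ===== CLAIM (what is proved, stated in full; the proofs are below) =====
def Claim_equal_parse_character_content : Prop := ∀ (content : String), Dom_parse_character_content content → Spec_parse_character_content content (parse_character_content content)

-- ===== LEMMAS AND PROOFS =====

-- the dict A maintains always has exactly these four keys in this order
def pvMk4 (a b c d : Option String) : PySem.Dict String (Option String) :=
  PySem.Dict.mk [("role", a), ("description", b), ("voice", c), ("first_appearance", d)]

lemma pv_insert_role (a b c d x : Option String) :
    (pvMk4 a b c d).insert "role" x = pvMk4 x b c d := by
  simp [PySem.Dict.insert, pvMk4]

lemma pv_insert_desc (a b c d x : Option String) :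
    (pvMk4 a b c d).insert "description" x = pvMk4 a x c d := by
  simp [PySem.Dict.insert, pvMk4]

lemma pv_insert_voice (a b c d x : Option String) :
    (pvMk4 a b c d).insert "voice" x = pvMk4 a b x d := by
  simp [PySem.Dict.insert, pvMk4]

lemma pv_insert_fa (a b c d x : Option String) :
    (pvMk4 a b c d).insert "first_appearance" x = pvMk4 a b c x := by
  simp [PySem.Dict.insert, pvMk4]

-- two incomparable literal prefixes cannot both be prefixes of the same line
lemma pv_not_both (s P Q : String) (h1 : ¬ (P.toList <+: Q.toList)) (h2 : ¬ (Q.toList <+: P.toList))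
    (hP : PySem.Str.startswith s P = true) : PySem.Str.startswith s Q = false := by
  by_contra h
  have hQ : PySem.Str.startswith s Q = true := by
    cases hh : PySem.Str.startswith s Q with
    | true => rfl
    | false => exact absurd hh h
  have hP' := (PySem.Chars.startswith_iff _ _).mp ((PySem.Str.startswith_eq s P) ▸ hP)
  have hQ' := (PySem.Chars.startswith_iff _ _).mp ((PySem.Str.startswith_eq s Q) ▸ hQ)
  rcases List.prefix_or_prefix_of_prefix (hP' : P.toList <+: s.toList) (hQ' : Q.toList <+: s.toList) with h | h
  · exact h1 h
  · exact h2 h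

-- the per-line contribution of B's search for one prefix
def pvG (pre : String) (n : Int) (s : String) : Option String :=
  if PySem.Str.startswith s pre then some (PySem.Str.strip (PySem.Str.slice s (some n) none))
  else none

-- A's elif step, written componentwise with Option.or
lemma pv_handle_mk4 (a b c d : Option String) (s : String) :
    pvHandleA (pvMk4 a b c d) s
      = pvMk4 ((pvG "**Role:**" 9 s).or a) ((pvG "**Description:**" 16 s).or b)
          ((pvG "**Voice:**" 10 s).or c) ((pvG "**First Appearance:**" 21 s).or d) := by
  unfold pvHandleA pvG
  by_cases h1 : PySem.Str.startswith s "**Role:**" = true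
  · have e2 := pv_not_both s "**Role:**" "**Description:**" (by decide) (by decide) h1
    have e3 := pv_not_both s "**Role:**" "**Voice:**" (by decide) (by decide) h1
    have e4 := pv_not_both s "**Role:**" "**First Appearance:**" (by decide) (by decide) h1
    simp only [h1, e2, e3, e4]
    simp [pv_insert_role]
  · by_cases h2 : PySem.Str.startswith s "**Description:**" = true
    · have e3 := pv_not_both s "**Description:**" "**Voice:**" (by decide) (by decide) h2
      have e4 := pv_not_both s "**Description:**" "**First Appearance:**" (by decide) (by decide) h2
      simp only [Bool.not_eq_true] at h1
      simp only [h1, h2, e3, e4]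
      simp [pv_insert_desc]
    · by_cases h3 : PySem.Str.startswith s "**Voice:**" = true
      · have e4 := pv_not_both s "**Voice:**" "**First Appearance:**" (by decide) (by decide) h3
        simp only [Bool.not_eq_true] at h1 h2
        simp only [h1, h2, h3, e4]
        simp [pv_insert_voice]
      · by_cases h4 : PySem.Str.startswith s "**First Appearance:**" = true
        · simp only [Bool.not_eq_true] at h1 h2 h3
          simp only [h1, h2, h3, h4]
          simp [pv_insert_fa]
        · simp only [Bool.not_eq_true] at h1 h2 h3 h4
          simp only [h1, h2, h3, h4]
          simp

-- search over ys ++ [x] = search ys, falling back to checking x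
lemma pv_lastValue_append (ys : List String) (x : String) (pre : String) (n : Int) :
    pvLastValue (ys ++ [x]) pre n = (pvLastValue ys pre n).or (pvG pre n x) := by
  induction ys with
  | nil => simp [pvLastValue, pvG]
  | cons y ys ih =>
    simp only [List.cons_append, pvLastValue]
    split
    · rfl
    · exact ih

-- invariant of A's fold: each field holds the last matching line's value, seeded by the start state
lemma pv_fold_mk4 (ls : List String) (a b c d : Option String) :
    ls.foldl (fun dd l => pvHandleA dd (PySem.Str.strip l)) (pvMk4 a b c d)
      = pvMk4 ((pvLastValue (ls.map PySem.Str.strip).reverse "**Role:**" 9).or a)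
          ((pvLastValue (ls.map PySem.Str.strip).reverse "**Description:**" 16).or b)
          ((pvLastValue (ls.map PySem.Str.strip).reverse "**Voice:**" 10).or c)
          ((pvLastValue (ls.map PySem.Str.strip).reverse "**First Appearance:**" 21).or d) := by
  induction ls generalizing a b c d with
  | nil => simp [pvLastValue]
  | cons x ls ih =>
    simp only [List.foldl_cons, pv_handle_mk4, ih, List.map_cons, List.reverse_cons,
      pv_lastValue_append, Option.or_assoc]

-- ===== VERDICT (by name: the statement is the Claim_ definition above) =====
theorem parse_character_content_spec : Claim_equal_parse_character_content := by
  intro content _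
  unfold Spec_parse_character_content parse_character_content parse_character_content_alt
  have hinit : pvInitA = pvMk4 none none none none := rfl
  rw [hinit, pv_fold_mk4]
  simp [pvMk4]
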